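-- pv_equiv track=rewrite | github.com/walshification/Projects | text/pig_latin.py | append_cons
-- ===== SOURCE A (Python) =====
-- def append_cons(word):
--     '''Moves the first consonants of a word to the end of the word.'''
--     first_consonants = ''
--     for char in word:
--         if char not in 'aeiou':
--             first_consonants += char
--         else:
--             break
--     return word[len(first_consonants):] + first_consonants
-- ===== SOURCE B (Python) =====
-- def append_cons(word):
--     '''Moves the first consonants of a word to the end of the word.'''
--     for _ in range(len(word)):
--         if word[0] in 'aeiou':
--             return word
--         word = word[1:] + word[0]
--     return word
-- ===== Notes on version B (the rewrite author's own statement) =====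
-- stated objective: alternative
-- what changed: B repeatedly rotates the word one character at a time (word = word[1:] + word[0]) until the first character is a vowel, capped at len(word) rotations, instead of accumulating the consonant prefix and doing one slice-and-concat.
import Mathlib
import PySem

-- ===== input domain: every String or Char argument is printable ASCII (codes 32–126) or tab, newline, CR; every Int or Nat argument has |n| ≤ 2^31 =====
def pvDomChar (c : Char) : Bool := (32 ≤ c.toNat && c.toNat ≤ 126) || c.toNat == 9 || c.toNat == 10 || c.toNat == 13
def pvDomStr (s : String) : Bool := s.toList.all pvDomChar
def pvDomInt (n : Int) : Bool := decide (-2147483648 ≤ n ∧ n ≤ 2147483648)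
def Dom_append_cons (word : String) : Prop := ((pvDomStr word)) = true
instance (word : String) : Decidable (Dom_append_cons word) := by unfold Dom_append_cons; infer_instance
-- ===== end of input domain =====

-- B rotates the word one character at a time until a vowel leads (capped at len(word) rotations),
-- instead of A's accumulate-the-consonant-prefix-then-slice; same return value, no speed claim.

-- shared by both ports: the Python test "char not in 'aeiou'"
def notVowel (c : Char) : Bool := !(c ∈ "aeiou".toList)

-- ===== PORT A =====
-- A: accumulate leading non-vowels one by one, break at first vowel; return word[len(acc):] + acc.
def appendConsLoop : List Char → List Char → List Char
  | [], acc => acc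
  | c :: rest, acc =>
      if notVowel c then appendConsLoop rest (acc ++ [c]) else acc

def append_cons (word : String) : String :=
  let firstConsonants := appendConsLoop word.toList []
  String.ofList (PySem.List.slice word.toList (some (firstConsonants.length : Int)) none
             ++ firstConsonants)

-- ===== PORT B =====
-- B: for _ in range(len(word)): if word[0] is a vowel return word, else rotate to word[1:] + word[0].
-- The [] branch is unreachable (rotation preserves length; the fuel starts at the word's length).
def rotLoop : Nat → List Char → List Char
  | 0, w => w
  | Nat.succ n, w =>
      match w with
      | [] => []
      | c :: rest => if !(notVowel c) then c :: rest else rotLoop n (rest ++ [c])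

def append_cons_alt (word : String) : String :=
  String.ofList (rotLoop word.toList.length word.toList)

-- ===== PRECONDITION & SPEC =====
def Spec_append_cons (word : String) (out : String) : Prop := out = append_cons_alt word
instance (word : String) (out : String) : Decidable (Spec_append_cons word out) := by unfold Spec_append_cons; infer_instance

-- ===== CLAIM (what is proved, stated in full; the proofs are below) =====
def Claim_equal_append_cons : Prop := ∀ (word : String), Dom_append_cons word → Spec_append_cons word (append_cons word)

-- ===== LEMMAS AND PROOFS =====

theorem takeWhile_eq_take_self (p : Char → Bool) (l : List Char) :
    l.takeWhile p = l.take (l.takeWhile p).length := by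
  induction l with
  | nil => simp
  | cons c rest ih => by_cases h : p c <;> simp [h, ih.symm]

theorem appendConsLoop_eq_takeWhile (l acc : List Char) :
    appendConsLoop l acc = acc ++ l.takeWhile notVowel := by
  induction l generalizing acc with
  | nil => simp [appendConsLoop]
  | cons c rest ih =>
      by_cases h : notVowel c
      · rw [appendConsLoop, if_pos h, ih, List.takeWhile_cons_of_pos h]
        simp
      · rw [appendConsLoop, if_neg h,
            List.takeWhile_cons_of_neg (by simpa using h)]
        simp

-- rotLoop rotates min(k, n) positions, where k is the length of the leading non-vowel run.
theorem rotLoop_eq_rotate (n : Nat) (w : List Char) (hn : n ≤ w.length) :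
    rotLoop n w =
      w.drop (min (w.takeWhile notVowel).length n)
        ++ w.take (min (w.takeWhile notVowel).length n) := by
  induction n generalizing w with
  | zero => simp [rotLoop]
  | succ n ih =>
      match w with
      | [] => simp at hn
      | c :: rest =>
          by_cases hv : notVowel c
          · -- leading consonant: one rotation, then the IH on rest ++ [c]
            rw [rotLoop]
            simp only [hv, Bool.not_true, Bool.false_eq_true, if_false]
            have hrest : n ≤ (rest ++ [c]).length := by simp at hn ⊢; omega
            rw [ih (rest ++ [c]) hrest]
            have hk : ((c :: rest).takeWhile notVowel).length
                = (rest.takeWhile notVowel).length + 1 := by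
              rw [List.takeWhile_cons_of_pos hv]; rfl
            rw [hk]
            set k' := (rest.takeWhile notVowel).length with hk'
            have hk'le : k' ≤ rest.length := (List.takeWhile_sublist _).length_le
            have hn' : n ≤ rest.length := by simp at hn; omega
            have hkw2 : ((rest ++ [c]).takeWhile notVowel).length
                = if k' = rest.length then rest.length + 1 else k' := by
              rw [List.takeWhile_append]
              split_ifs with h1
              · rw [List.takeWhile_cons_of_pos hv]; simp
              · rfl
            rw [hkw2]
            by_cases hall : k' = rest.length
            · -- rest is all non-vowels; the fuel n ≤ rest.length runs out first
              rw [if_pos hall]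
              have hmin1 : min (rest.length + 1) n = n := by omega
              have hmin2 : min (k' + 1) (n + 1) = n + 1 := by omega
              rw [hmin1, hmin2,
                  List.drop_append_of_le_length hn', List.take_append_of_le_length hn',
                  List.drop_succ_cons, List.take_succ_cons]
              simp
            · -- the first vowel occurs inside rest at index k' < rest.length
              rw [if_neg hall]
              have hj : min k' n ≤ rest.length := by omega
              have hmin : min (k' + 1) (n + 1) = min k' n + 1 := by omega
              rw [hmin,
                  List.drop_append_of_le_length hj, List.take_append_of_le_length hj,
                  List.drop_succ_cons, List.take_succ_cons]
              simp
          · -- leading vowel: the loop returns the word unchanged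
            rw [rotLoop]
            simp only [hv, Bool.not_false, if_true]
            rw [List.takeWhile_cons_of_neg (by simpa using hv)]
            simp

-- ===== VERDICT (by name: the statement is the Claim_ definition above) =====
theorem append_cons_spec : Claim_equal_append_cons := by
  intro word _
  unfold Spec_append_cons append_cons append_cons_alt
  rw [appendConsLoop_eq_takeWhile]
  have hk : (word.toList.takeWhile notVowel).length ≤ word.toList.length :=
    (List.takeWhile_sublist _).length_le
  rw [rotLoop_eq_rotate word.toList.length word.toList le_rfl, Nat.min_eq_left hk]
  simp only [List.nil_append, PySem.List.slice_from_natCast]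
  rw [← takeWhile_eq_take_self]
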